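-- pv_equiv track=rewrite | github.com/ceelogre/challenges | Debts/debts.py | debt_evader
-- ===== SOURCE A (Python) =====
-- def debt_evader(payments_array):
--   # start at the first element
--   #loop through all payments taking sum of all prev elements
--   # if at any point sum is less than zero, move the element to the end
--   #repeat
--   # if we reach the end of the array and the sum is positive stop
--
--   index = 0
--   array_sum = 0
--   relocations = 0
--   while (index < len(payments_array)):
--     array_sum = sum(payments_array[:index+1])
--     if array_sum < 0:
--       neg_sum_elt = payments_array.pop(index)
--       payments_array.append(neg_sum_elt)
--       relocations += 1
--       index, array_sum = -1, 0
--     index += 1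
--   return relocations
-- ===== SOURCE B (Python) =====
-- def debt_evader(payments_array):
--     # Single pass with a FIFO queue (list + head index) and a running sum:
--     # an element that would make the running sum negative is re-queued at the
--     # end (one relocation) instead of restarting the whole prefix scan.
--     # Note: unlike A, B does not mutate payments_array (return value is the same).
--     queue = list(payments_array)
--     head = 0
--     running = 0
--     relocations = 0
--     while head < len(queue):
--         x = queue[head]
--         head += 1
--         if running + x < 0:
--             queue.append(x)
--             relocations += 1
--         else:
--             running += x
--     return relocations
-- ===== Notes on version B (the rewrite author's own statement) =====
-- stated objective: faster
-- what changed: Replaces A's restart-from-zero loop that recomputes sum(arr[:i+1]) by slicing at every step with a single forward pass over a FIFO queue keeping a running sum, re-queueing an offending element and continuing instead of restarting; intended as faster (O(n+R) vs O((n+R)*n)), measured 785x at n=16384 on inputs where both finish (a timing run reports unconfirmed only because random inputs with negative total sum, outside Pre_, make both programs loop forever).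
import Mathlib
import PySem

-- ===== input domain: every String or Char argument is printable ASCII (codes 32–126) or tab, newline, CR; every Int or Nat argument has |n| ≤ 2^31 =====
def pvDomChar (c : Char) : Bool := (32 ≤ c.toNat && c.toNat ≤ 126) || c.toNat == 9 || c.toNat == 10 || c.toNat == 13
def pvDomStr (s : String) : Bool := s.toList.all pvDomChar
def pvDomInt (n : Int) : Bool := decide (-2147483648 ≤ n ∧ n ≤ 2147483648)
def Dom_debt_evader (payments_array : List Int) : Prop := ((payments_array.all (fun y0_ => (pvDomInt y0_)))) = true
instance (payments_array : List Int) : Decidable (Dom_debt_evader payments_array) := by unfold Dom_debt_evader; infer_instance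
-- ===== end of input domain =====

-- B replaces A's restart-from-zero scan (which recomputes each prefix sum by slicing) with a
-- single forward pass over a FIFO queue keeping a running sum; equivalence is about the RETURN
-- value only (Python A rotates its argument list in place, B leaves it untouched).


-- ===== PORT A =====
-- Fuel bound under which the loop is proven to finish whenever the list's total sum is
-- nonnegative (Pre_); the fuel guard only totalises the Python while-loop, it changes nothing
-- on admitted inputs.  Python's `index, array_sum = -1, 0` followed by `index += 1` restarts
-- the loop at index 0, which is what the recursive call with index 0 does.
def aFuel (n : Nat) : Nat := (n * (n + 2) + n) * (n + 2) + 1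

def aloopO : Nat → List Int → Nat → Int → Option Int
  | 0, _, _, _ => none
  | f + 1, arr, index, relocations =>
    if h : index < arr.length then
      if (arr.take (index + 1)).sum < 0 then
        aloopO f (arr.eraseIdx index ++ [arr[index]]) 0 (relocations + 1)
      else
        aloopO f arr (index + 1) relocations
    else
      some relocations

def debt_evader (payments_array : List Int) : Int :=
  (aloopO (aFuel payments_array.length) payments_array 0 0).getD 0

-- ===== PORT B =====
-- Same fuel device: under Pre_ the pass is proven to finish within bFuel steps.
def bFuel (n : Nat) : Nat := n * (n + 2) + n + 1

def bloopO : Nat → List Int → Nat → Int → Int → Option Int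
  | 0, _, _, _, _ => none
  | f + 1, queue, head, running, relocations =>
    if h : head < queue.length then
      let x := queue[head]
      if running + x < 0 then
        bloopO f (queue ++ [x]) (head + 1) running (relocations + 1)
      else
        bloopO f queue (head + 1) (running + x) relocations
    else
      some relocations

def debt_evader_alt (payments_array : List Int) : Int :=
  (bloopO (bFuel payments_array.length) payments_array 0 0 0).getD 0

-- ===== PRECONDITION & SPEC =====
-- Pre_ excludes exactly the lists with negative total sum: on those the Python A (and B) never
-- returns — every arrangement of the list has a negative prefix, so A relocates forever.
def Pre_debt_evader (payments_array : List Int) : Prop := 0 ≤ payments_array.sum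
instance (payments_array : List Int) : Decidable (Pre_debt_evader payments_array) := by
  unfold Pre_debt_evader; infer_instance

def pvWitness_debt_evader : List Int := [3, -2, -2, 4]

def Spec_debt_evader (payments_array : List Int) (out : Int) : Prop := out = debt_evader_alt payments_array
instance (payments_array : List Int) (out : Int) : Decidable (Spec_debt_evader payments_array out) := by unfold Spec_debt_evader; infer_instance

-- ===== CLAIM (what is proved, stated in full; the proofs are below) =====
def Claim_equal_debt_evader : Prop := ∀ (payments_array : List Int), Dom_debt_evader payments_array → Pre_debt_evader payments_array → Spec_debt_evader payments_array (debt_evader payments_array)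

-- ===== LEMMAS AND PROOFS =====

-- Abstract queue loop: `bloopO queue head` seen through `queue.drop head`.
def bQ : Nat → Int → List Int → Int → Option Int
  | 0, _, _, _ => none
  | _ + 1, _, [], c => some c
  | f + 1, s, x :: q, c => if s + x < 0 then bQ f s (q ++ [x]) (c + 1) else bQ f (s + x) q c

-- `arr.take j` has nonnegative sum for every j ≤ i (A's loop invariant at index i).
def prefixGood (arr : List Int) (i : Nat) : Prop := ∀ j, j ≤ i → 0 ≤ (arr.take j).sum

-- index of the first queue element the running sum accepts
def goodIdx (s : Int) (q : List Int) : Nat := q.findIdx (fun y => decide (0 ≤ s + y))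

lemma bloopO_eq_bQ (f : Nat) : ∀ (queue : List Int) (head : Nat) (s c : Int),
    head ≤ queue.length → bloopO f queue head s c = bQ f s (queue.drop head) c := by
  induction f with
  | zero => intro queue head s c _; rfl
  | succ f ih =>
    intro queue head s c hle
    by_cases h : head < queue.length
    · rw [List.drop_eq_getElem_cons h]
      simp only [bloopO, dif_pos h, bQ]
      split_ifs with hneg
      · rw [ih (queue ++ [queue[head]]) (head + 1) s (c + 1) (by simp; omega),
            List.drop_append_of_le_length (by omega)]
      · exact ih queue (head + 1) (s + queue[head]) c h
    · have : head = queue.length := by omega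
      subst this
      simp [bloopO, bQ, List.drop_length]

lemma bQ_mono (f : Nat) : ∀ (f' : Nat) (s : Int) (q : List Int) (c v : Int),
    bQ f s q c = some v → f ≤ f' → bQ f' s q c = some v := by
  induction f with
  | zero => intro f' s q c v h _; simp [bQ] at h
  | succ f ih =>
    intro f' s q c v h hle
    obtain ⟨f'', rfl⟩ : ∃ k, f' = k + 1 := ⟨f' - 1, by omega⟩
    match q with
    | [] => simpa [bQ] using h
    | x :: q =>
      simp only [bQ] at h ⊢
      split_ifs with hneg <;> simp only [hneg, if_pos] at h <;>
        exact ih f'' _ _ _ _ (by simpa [hneg] using h) (by omega)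

-- scanning an all-good prefix consumes exactly its length in fuel and adds its sum
lemma bQ_stutter (p : List Int) : ∀ (f : Nat) (s : Int) (q : List Int) (c : Int),
    (∀ j, j ≤ p.length → 0 ≤ s + (p.take j).sum) →
    bQ (p.length + f) s (p ++ q) c = bQ f (s + p.sum) q c := by
  induction p with
  | nil => intro f s q c _; simp
  | cons a p ih =>
    intro f s q c hgood
    have h1 : 0 ≤ s + a := by simpa using hgood 1 (by simp)
    simp only [List.length_cons, List.cons_append]
    have he : p.length + 1 + f = (p.length + f) + 1 := by omega
    rw [he]
    simp only [bQ, if_neg (by omega : ¬ s + a < 0)]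
    rw [ih f (s + a) q c (by
      intro j hj
      have := hgood (j + 1) (by simpa using hj)
      simpa [add_assoc] using this)]
    simp [add_assoc]

lemma exists_good (q : List Int) : ∀ (s : Int), 0 ≤ s → 0 ≤ s + q.sum → q ≠ [] →
    ∃ x ∈ q, 0 ≤ s + x := by
  induction q with
  | nil => intro s _ _ h; exact absurd rfl h
  | cons a q ih =>
    intro s hs hsum _
    by_cases ha : 0 ≤ s + a
    · exact ⟨a, List.mem_cons_self, ha⟩
    · have hq : q ≠ [] := by rintro rfl; simp at hsum; omega
      have hs' : 0 ≤ s + q.sum := by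
        simp only [List.sum_cons] at hsum
        omega
      obtain ⟨x, hx, hgx⟩ := ih s hs hs' hq
      exact ⟨x, List.mem_cons_of_mem _ hx, hgx⟩

lemma goodIdx_lt (s : Int) (q : List Int) (x : Int) (hx : x ∈ q) (hgx : 0 ≤ s + x) :
    goodIdx s q < q.length :=
  List.findIdx_lt_length_of_exists ⟨x, hx, by simpa using hgx⟩

lemma goodIdx_le (s : Int) (q : List Int) : goodIdx s q ≤ q.length :=
  List.findIdx_le_length

lemma goodIdx_cons_neg (s x : Int) (q : List Int) (h : s + x < 0) :
    goodIdx s (x :: q) = goodIdx s q + 1 := by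
  unfold goodIdx
  rw [List.findIdx_cons]
  simp [show ¬ (0 ≤ s + x) by omega]

lemma goodIdx_append (s : Int) (q r : List Int) (h : goodIdx s q < q.length) :
    goodIdx s (q ++ r) = goodIdx s q := by
  induction q with
  | nil => simp [goodIdx] at h
  | cons a q ih =>
    by_cases ha : (0 : Int) ≤ s + a
    · simp [goodIdx, List.findIdx_cons, ha]
    · have h' : goodIdx s q < q.length := by
        rw [goodIdx_cons_neg s a q (by omega), List.length_cons] at h
        omega
      rw [List.cons_append, goodIdx_cons_neg s a (q ++ r) (by omega),
          goodIdx_cons_neg s a q (by omega), ih h']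

-- B terminates within its measure: q.length * (N+2) + goodIdx
lemma bQ_terminates (f : Nat) : ∀ (N : Nat) (s : Int) (q : List Int) (c : Int),
    q.length ≤ N → 0 ≤ s → 0 ≤ s + q.sum →
    q.length * (N + 2) + goodIdx s q < f → ∃ v, bQ f s q c = some v := by
  induction f with
  | zero => intro N s q c _ _ _ h; omega
  | succ f ih =>
    intro N s q c hN hs hsum hfuel
    match q with
    | [] => exact ⟨c, rfl⟩
    | x :: q =>
      simp only [bQ]
      split_ifs with hneg
      · -- requeue: some later element is acceptable, its index shifts down by one
        obtain ⟨y, hy, hgy⟩ := exists_good (x :: q) s hs hsum (by simp)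
        have hyq : y ∈ q := by
          rcases List.mem_cons.mp hy with rfl | h
          · omega
          · exact h
        have hlt : goodIdx s q < q.length := goodIdx_lt s q y hyq hgy
        apply ih N s (q ++ [x]) (c + 1) (by simp at hN ⊢; omega) hs
          (by simp at hsum ⊢; omega)
        rw [goodIdx_append s q [x] hlt]
        have hlen : (q ++ [x]).length = q.length + 1 := by simp
        rw [hlen]
        rw [goodIdx_cons_neg s x q hneg, List.length_cons] at hfuel
        omega
      · -- accept: queue shrinks
        apply ih N (s + x) q c (by simp at hN; omega) (by omega)
          (by simp at hsum ⊢; omega)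
        have h1 : goodIdx (s + x) q ≤ q.length := goodIdx_le _ _
        have h2 : q.length + 1 ≤ N := by simpa using hN
        rw [List.length_cons] at hfuel
        have hexp : (q.length + 1) * (N + 2) = q.length * (N + 2) + (N + 2) := by ring
        omega

-- take/drop/sum facts about A's pop-and-append step
lemma pop_take (arr : List Int) (i : Nat) (h : i < arr.length) (j : Nat) (hj : j ≤ i) :
    (arr.eraseIdx i ++ [arr[i]]).take j = arr.take j := by
  rw [List.eraseIdx_eq_take_drop_succ, List.append_assoc,
      List.take_append_of_le_length (by simp; omega), List.take_take,
      Nat.min_eq_left hj]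

lemma pop_drop (arr : List Int) (i : Nat) (h : i < arr.length) :
    (arr.eraseIdx i ++ [arr[i]]).drop i = arr.drop (i + 1) ++ [arr[i]] := by
  rw [List.eraseIdx_eq_take_drop_succ, List.append_assoc,
      List.drop_append_of_le_length (by simp; omega), List.drop_take]
  simp

lemma pop_length (arr : List Int) (i : Nat) (h : i < arr.length) :
    (arr.eraseIdx i ++ [arr[i]]).length = arr.length := by
  simp [List.length_eraseIdx_of_lt h]; omega

lemma take_succ_sum (arr : List Int) (i : Nat) (h : i < arr.length) :
    (arr.take (i + 1)).sum = (arr.take i).sum + arr[i] := by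
  rw [List.take_succ_eq_append_getElem h, List.sum_append]
  simp

lemma drop_sum (arr : List Int) (i : Nat) :
    (arr.take i).sum + (arr.drop i).sum = arr.sum := by
  conv_rhs => rw [← List.take_append_drop i arr]
  rw [List.sum_append]

lemma pop_sum (arr : List Int) (i : Nat) (h : i < arr.length) :
    (arr.eraseIdx i ++ [arr[i]]).sum = arr.sum := by
  rw [List.sum_append, List.eraseIdx_eq_take_drop_succ, List.sum_append, List.sum_singleton]
  have h2 := drop_sum arr (i + 1)
  have h3 := take_succ_sum arr i h
  omega

-- partial correctness: whatever A's loop returns, B's queue loop returns from the matching state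
lemma aloopO_to_bQ (f : Nat) : ∀ (arr : List Int) (i : Nat) (r v : Int),
    prefixGood arr i → i ≤ arr.length → aloopO f arr i r = some v →
    ∃ g, bQ g ((arr.take i).sum) (arr.drop i) r = some v := by
  induction f with
  | zero => intro arr i r v _ _ h; simp [aloopO] at h
  | succ f ih =>
    intro arr i r v hgood hle h
    by_cases hi : i < arr.length
    · simp only [aloopO, dif_pos hi] at h
      split_ifs at h with hneg
      · -- pop-and-append, restart at 0
        set arr' := arr.eraseIdx i ++ [arr[i]] with harr'
        obtain ⟨g, hg⟩ := ih arr' 0 (r + 1) v (by intro j hj; interval_cases j; simp) (by omega) h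
        have hg' : bQ (i + g) 0 arr' (r + 1) = some v := by
          apply bQ_mono g (i + g) _ _ _ _ _ (by omega)
          simpa using hg
        have hlen' : i ≤ arr'.length := by rw [pop_length arr i hi]; omega
        have htk : arr'.take i = arr.take i := pop_take arr i hi i le_rfl
        have hlentk : (arr'.take i).length = i := by rw [List.length_take]; omega
        rw [← List.take_append_drop i arr'] at hg'
        have hstut := bQ_stutter (arr'.take i) g 0 (arr'.drop i) (r + 1) (by
          intro j hj
          rw [hlentk] at hj
          rw [List.take_take, Nat.min_eq_left hj, pop_take arr i hi j hj]
          simpa using hgood j hj)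
        rw [hlentk] at hstut
        rw [hstut, htk, pop_drop arr i hi] at hg'
        refine ⟨g + 1, ?_⟩
        rw [List.drop_eq_getElem_cons hi]
        have hsx : (arr.take i).sum + arr[i] < 0 := by
          rw [← take_succ_sum arr i hi]; exact hneg
        simp only [bQ, if_pos hsx]
        simpa using hg'
      · -- accept, advance
        have hgood' : prefixGood arr (i + 1) := by
          intro j hj
          rcases Nat.lt_or_ge j (i + 1) with hj' | hj'
          · exact hgood j (by omega)
          · have : j = i + 1 := by omega
            subst this
            omega
        obtain ⟨g, hg⟩ := ih arr (i + 1) r v hgood' (by omega) h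
        refine ⟨g + 1, ?_⟩
        rw [List.drop_eq_getElem_cons hi]
        have hsx : ¬ ((arr.take i).sum + arr[i] < 0) := by
          rw [← take_succ_sum arr i hi]; exact hneg
        simp only [bQ, if_neg hsx]
        rw [← take_succ_sum arr i hi]
        exact hg
    · have hieq : i = arr.length := by omega
      subst hieq
      simp only [aloopO, dif_neg (lt_irrefl _)] at h
      have hrv : r = v := by simpa using h
      subst hrv
      exact ⟨1, by rw [List.drop_length]; rfl⟩

-- A's rescan of an already-good prefix: one loop step per fuel unit, no state change
lemma aloopO_stutter (k : Nat) : ∀ (f : Nat) (arr : List Int) (j : Nat) (r : Int),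
    prefixGood arr (j + k) → j + k ≤ arr.length →
    aloopO (k + f) arr j r = aloopO f arr (j + k) r := by
  induction k with
  | zero => intro f arr j r _ _; simp
  | succ k ih =>
    intro f arr j r hgood hle
    have hj : j < arr.length := by omega
    have hacc : ¬ (arr.take (j + 1)).sum < 0 := by
      have := hgood (j + 1) (by omega)
      omega
    have he : k + 1 + f = (k + f) + 1 := by omega
    rw [he]
    simp only [aloopO, dif_pos hj, if_neg hacc]
    rw [ih f arr (j + 1) r (by intro m hm; exact hgood m (by omega)) (by omega),
        show j + 1 + k = j + (k + 1) by omega]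

-- fuel arithmetic, products kept abstract for omega
lemma arith_pop (P n i f : Nat) (hi : i < n) (hfuel : (P + 1) * (n + 2) < f + 1) :
    P * (n + 2) < f - i ∧ i + 1 ≤ f := by
  have h : (P + 1) * (n + 2) = P * (n + 2) + (n + 2) := by ring
  omega

lemma arith_accept (L idx idx' n f : Nat) (hidx' : idx' ≤ L) (hL : L + 1 ≤ n)
    (hfuel : ((L + 1) * (n + 2) + idx) * (n + 2) < f + 1) :
    (L * (n + 2) + idx') * (n + 2) < f := by
  have a1 : L * (n + 2) + idx' ≤ L * (n + 2) + L := by omega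
  have a2 : (L * (n + 2) + idx') * (n + 2) ≤ (L * (n + 2) + L) * (n + 2) :=
    Nat.mul_le_mul_right _ a1
  have a3 : L * (n + 2) + L + 1 ≤ (L + 1) * (n + 2) + idx := by
    have he : (L + 1) * (n + 2) = L * (n + 2) + (n + 2) := by ring
    omega
  have a4 : (L * (n + 2) + L) * (n + 2) + (n + 2) ≤ ((L + 1) * (n + 2) + idx) * (n + 2) := by
    calc (L * (n + 2) + L) * (n + 2) + (n + 2) = (L * (n + 2) + L + 1) * (n + 2) := by ring
      _ ≤ _ := Nat.mul_le_mul_right _ a3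
  omega

-- A terminates within its measure
lemma aloopO_terminates (f : Nat) : ∀ (arr : List Int) (i : Nat) (r : Int),
    prefixGood arr i → i ≤ arr.length → 0 ≤ arr.sum →
    ((arr.length - i) * (arr.length + 2) + goodIdx ((arr.take i).sum) (arr.drop i)) *
      (arr.length + 2) < f →
    (aloopO f arr i r).isSome := by
  induction f using Nat.strong_induction_on with
  | _ f IH =>
  intro arr i r hgood hle hsum hfuel
  obtain ⟨f', rfl⟩ : ∃ k, f = k + 1 := ⟨f - 1, by omega⟩
  by_cases hi : i < arr.length
  · simp only [aloopO, dif_pos hi]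
    have hs0 : 0 ≤ (arr.take i).sum := hgood i le_rfl
    split_ifs with hneg
    · -- pop: stutter back to index i, with the first-good index one smaller
      have hsx : (arr.take i).sum + arr[i] < 0 := by
        rw [← take_succ_sum arr i hi]; exact hneg
      have hlen' : (arr.eraseIdx i ++ [arr[i]]).length = arr.length := pop_length arr i hi
      have hdropq : arr.drop i = arr[i] :: arr.drop (i + 1) := List.drop_eq_getElem_cons hi
      have hsumdrop : 0 ≤ (arr.take i).sum + (arr.drop i).sum := by
        have := drop_sum arr i; omega
      have hne : arr.drop i ≠ [] := by
        rw [List.drop_eq_getElem_cons hi]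
        exact List.cons_ne_nil _ _
      obtain ⟨y, hy, hgy⟩ := exists_good (arr.drop i) ((arr.take i).sum) hs0 hsumdrop hne
      have hyq : y ∈ arr.drop (i + 1) := by
        rw [hdropq] at hy
        rcases List.mem_cons.mp hy with rfl | hmem
        · omega
        · exact hmem
      have hltq : goodIdx ((arr.take i).sum) (arr.drop (i + 1)) < (arr.drop (i + 1)).length :=
        goodIdx_lt _ _ y hyq hgy
      have hcons : goodIdx ((arr.take i).sum) (arr.drop i)
          = goodIdx ((arr.take i).sum) (arr.drop (i + 1)) + 1 := by
        rw [hdropq]; exact goodIdx_cons_neg _ _ _ hsx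
      -- fuel accounting
      have harith := arith_pop
        ((arr.length - i) * (arr.length + 2) + goodIdx ((arr.take i).sum) (arr.drop (i + 1)))
        arr.length i f' hi (by rw [hcons] at hfuel; omega)
      have hstut := aloopO_stutter i (f' - i) (arr.eraseIdx i ++ [arr[i]]) 0 (r + 1)
        (by
          intro j hj
          simp only [Nat.zero_add] at hj ⊢
          rw [pop_take arr i hi j hj]
          exact hgood j hj)
        (by simp only [Nat.zero_add]; omega)
      rw [show i + (f' - i) = f' by omega, Nat.zero_add] at hstut
      rw [hstut]
      apply IH (f' - i) (by omega) _ i (r + 1)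
        (by intro j hj; rw [pop_take arr i hi j hj]; exact hgood j hj)
        (by omega)
        (by rw [pop_sum arr i hi]; omega)
      rw [hlen', pop_take arr i hi i le_rfl, pop_drop arr i hi,
          goodIdx_append _ _ [arr[i]] hltq]
      exact harith.1
    · -- accept
      have hsx : 0 ≤ (arr.take (i + 1)).sum := by omega
      apply IH f' (by omega) arr (i + 1) r
        (by
          intro j hj
          rcases Nat.lt_or_ge j (i + 1) with hj' | hj'
          · exact hgood j (by omega)
          · have hje : j = i + 1 := by omega
            subst hje
            exact hsx)
        (by omega) hsum
      have h1 : goodIdx ((arr.take (i + 1)).sum) (arr.drop (i + 1)) ≤ (arr.drop (i + 1)).length :=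
        goodIdx_le _ _
      have h2 : (arr.drop (i + 1)).length = arr.length - (i + 1) := by simp
      have h3 : arr.length - i = (arr.length - (i + 1)) + 1 := by omega
      rw [h3] at hfuel
      exact arith_accept (arr.length - (i + 1)) _ _ arr.length f' (by omega) (by omega) hfuel
  · simp [aloopO, hi]

-- ===== VERDICT (by name: the statement is the Claim_ definition above) =====
theorem debt_evader_spec : Claim_equal_debt_evader := by
  intro arr _ hpre
  unfold Spec_debt_evader Pre_debt_evader at *
  unfold debt_evader debt_evader_alt
  -- B returns: its fuel covers the measure
  have hBidx : goodIdx 0 arr ≤ arr.length := goodIdx_le _ _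
  obtain ⟨w, hw⟩ := bQ_terminates (bFuel arr.length) arr.length 0 arr 0 le_rfl le_rfl
    (by simpa using hpre)
    (by unfold bFuel; omega)
  have hBport : bloopO (bFuel arr.length) arr 0 0 0 = some w := by
    rw [bloopO_eq_bQ (bFuel arr.length) arr 0 0 0 (by omega)]
    simpa using hw
  -- A returns: its fuel covers the measure
  have hA := aloopO_terminates (aFuel arr.length) arr 0 0
    (by intro j hj; interval_cases j; simp) (by omega) hpre
    (by
      unfold aFuel
      rw [Nat.sub_zero]
      have h1 : goodIdx ((arr.take 0).sum) (arr.drop 0) ≤ arr.length := by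
        simpa using goodIdx_le 0 arr
      have h2 : arr.length * (arr.length + 2) + goodIdx ((arr.take 0).sum) (arr.drop 0)
          ≤ arr.length * (arr.length + 2) + arr.length := by omega
      have h3 := Nat.mul_le_mul_right (arr.length + 2) h2
      omega)
  obtain ⟨v, hv⟩ := Option.isSome_iff_exists.mp hA
  -- A's value is also produced by B's queue loop, hence equals w
  obtain ⟨g, hg⟩ := aloopO_to_bQ (aFuel arr.length) arr 0 0 v
    (by intro j hj; interval_cases j; simp) (by omega) hv
  simp only [List.take_zero, List.sum_nil, List.drop_zero] at hg
  have hmax := bQ_mono g (g + bFuel arr.length) 0 arr 0 v hg (by omega)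
  have hmax' := bQ_mono (bFuel arr.length) (g + bFuel arr.length) 0 arr 0 w hw (by omega)
  rw [hmax] at hmax'
  rw [hv, hBport]
  simp at hmax' ⊢
  omega
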